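-- pv_equiv track=rewrite | github.com/XAM11D/Lab-4 | main.py | task10
-- ===== SOURCE A (Python) =====
-- def task10(n):
--     def generate_pascals_triangle(num_rows):
--         triangle = [[1]]
--         for _ in range(1, num_rows):
--             prev_row = triangle[-1]
--             next_row = [1]
--             for j in range(1, len(prev_row)):
--                 next_row.append(prev_row[j - 1] + prev_row[j])
--             next_row.append(1)
--             triangle.append(next_row)
--         return triangle
--
--     triangle = generate_pascals_triangle(n)
--     last_row = triangle[-1]
--     return max(last_row)
-- ===== SOURCE B (Python) =====
-- def task10(n):
--     # Max of row n-1 of Pascal's triangle is the central binomial C(k, k//2), k = max(n-1, 0).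
--     k = n - 1 if n > 1 else 0
--     c = 1
--     for i in range(k // 2):
--         c = c * (k - i) // (i + 1)
--     return c
-- ===== Notes on version B (the rewrite author's own statement) =====
-- stated objective: alternative
-- what changed: Replaces building the whole Pascal triangle row by row and taking max of the last row with a direct multiplicative computation of the central binomial coefficient C(k, k//2) with k = max(n-1, 0); fewer big-int operations (O(n) vs O(n^2)), though big-int magnitudes dominate at large n so a timing run did not confirm a speed-up at the largest sizes.
import Mathlib
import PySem

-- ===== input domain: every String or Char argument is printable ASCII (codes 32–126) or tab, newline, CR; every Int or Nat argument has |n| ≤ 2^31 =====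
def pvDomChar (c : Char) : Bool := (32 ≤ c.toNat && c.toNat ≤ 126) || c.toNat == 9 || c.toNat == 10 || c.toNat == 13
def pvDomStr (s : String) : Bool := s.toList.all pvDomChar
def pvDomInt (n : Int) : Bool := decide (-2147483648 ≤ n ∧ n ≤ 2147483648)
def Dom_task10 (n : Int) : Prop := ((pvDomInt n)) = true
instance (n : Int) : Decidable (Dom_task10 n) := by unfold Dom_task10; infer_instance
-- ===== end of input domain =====

-- B replaces A's row-by-row construction of the whole Pascal triangle with a direct
-- multiplicative computation of the central binomial coefficient C(k, k//2), k = max(n-1, 0).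

-- ===== PORT A =====
-- inner loop of generate_pascals_triangle: next_row = [1]; for j in range(1, len(prev)): append prev[j-1]+prev[j]; append 1
def task10_nextRow (prev : List Int) : List Int :=
  ((PySem.List.pyRange 1 (prev.length : Int) 1).foldl
    (fun row j => row ++ [PySem.List.pyGetD prev (j - 1) 0 + PySem.List.pyGetD prev j 0]) [1]) ++ [1]

def task10 (n : Int) : Int :=
  -- generate_pascals_triangle(n): triangle = [[1]]; for _ in range(1, n): append nextRow(triangle[-1])
  let triangle := (PySem.List.pyRange 1 n 1).foldl
    (fun tri _ => tri ++ [task10_nextRow ((PySem.List.pyGet? tri (-1)).getD [])]) [[1]]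
  -- last_row = triangle[-1]; return max(last_row)   (triangle is never empty, so the defaults are unreachable)
  let lastRow := (PySem.List.pyGet? triangle (-1)).getD []
  (PySem.List.max? lastRow (fun x => x)).getD 0

-- ===== PORT B =====
def task10_alt (n : Int) : Int :=
  let k : Int := if n > 1 then n - 1 else 0
  (PySem.List.pyRange 0 (PySem.Int.floordiv k 2) 1).foldl
    (fun c i => PySem.Int.floordiv (c * (k - i)) (i + 1)) 1

-- ===== PRECONDITION & SPEC =====
def Spec_task10 (n : Int) (out : Int) : Prop := out = task10_alt n
instance (n : Int) (out : Int) : Decidable (Spec_task10 n out) := by unfold Spec_task10; infer_instance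

-- ===== CLAIM (what is proved, stated in full; the proofs are below) =====
def Claim_equal_task10 : Prop := ∀ (n : Int), Dom_task10 n → Spec_task10 n (task10 n)

-- ===== LEMMAS AND PROOFS =====

-- row k of Pascal's triangle, as binomial coefficients
def pascalRow (k : Nat) : List Int :=
  (List.range (k + 1)).map (fun j => ((k.choose j : Nat) : Int))

theorem pyGet_neg_one_append (tri : List (List Int)) (x : List Int) :
    PySem.List.pyGet? (tri ++ [x]) (-1) = some x := by
  simp [PySem.List.pyGet?, PySem.List.pyIdx?]

theorem pascalRow_get (k t : Nat) (h : t < k + 1) :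
    PySem.List.pyGetD (pascalRow k) ((t:Int)) 0 = ((k.choose t : Nat) : Int) := by
  rw [pascalRow, PySem.List.pyGetD_natCast]
  simp [List.getD_eq_getElem?_getD, h]

theorem pascalRow_nextRow (k : Nat) : task10_nextRow (pascalRow k) = pascalRow (k + 1) := by
  unfold task10_nextRow
  rw [PySem.List.foldl_append_singleton_eq_map]
  have hlen : ((pascalRow k).length : Int) = ((k:Int) + 1) := by
    simp [pascalRow]
  rw [hlen]
  have hr : PySem.List.pyRange 1 ((k:Int)+1) 1 = (List.range k).map (fun t : Nat => 1 + (t:Int)) := by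
    rw [PySem.List.pyRange_one]
    have e : ((k:Int)+1-1).toNat = k := by omega
    rw [e]
  rw [hr, List.map_map]
  have hmid : (List.range k).map ((fun j => PySem.List.pyGetD (pascalRow k) (j - 1) 0 + PySem.List.pyGetD (pascalRow k) j 0) ∘ (fun t : Nat => 1 + (t:Int)))
      = (List.range k).map (fun t : Nat => (((k+1).choose (t+1) : Nat) : Int)) := by
    apply List.map_congr_left
    intro t ht
    simp only [List.mem_range] at ht
    simp only [Function.comp]
    have e1 : (1 : Int) + (t:Int) - 1 = ((t:Nat):Int) := by omega
    have e2 : (1 : Int) + (t:Int) = (((t+1:Nat)):Int) := by omega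
    rw [e1, e2, pascalRow_get k t (by omega), pascalRow_get k (t+1) (by omega), Nat.choose_succ_succ]
    push_cast; ring
  rw [hmid]
  conv_rhs => rw [pascalRow]
  rw [show k + 1 + 1 = (k+1) + 1 from rfl, List.range_succ, List.map_append,
      List.range_succ_eq_map, List.map_cons, List.map_map]
  simp [Function.comp]

theorem task10_lastRow (l : List Int) (tri : List (List Int)) (k : Nat)
    (h : PySem.List.pyGet? tri (-1) = some (pascalRow k)) :
    PySem.List.pyGet? (l.foldl (fun t _ =>
      t ++ [task10_nextRow ((PySem.List.pyGet? t (-1)).getD [])]) tri) (-1)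
      = some (pascalRow (k + l.length)) := by
  induction l generalizing tri k with
  | nil => simpa using h
  | cons a l ih =>
    simp only [List.foldl_cons, List.length_cons]
    rw [show k + (l.length + 1) = (k+1) + l.length by omega]
    apply ih
    rw [h]
    simp only [Option.getD_some]
    rw [pyGet_neg_one_append, pascalRow_nextRow]

theorem task10_max_pascalRow (k : Nat) :
    (PySem.List.max? (pascalRow k) (fun x => x)).getD 0 = ((k.choose (k / 2) : Nat) : Int) := by
  have hne : pascalRow k ≠ [] := by simp [pascalRow]
  obtain ⟨m, hm⟩ : ∃ m, PySem.List.max? (pascalRow k) (fun x => x) = some m := by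
    cases hmx : PySem.List.max? (pascalRow k) (fun x => x) with
    | none => exact absurd ((PySem.List.max?_eq_none_iff _ _).mp hmx) hne
    | some m => exact ⟨m, rfl⟩
  rw [hm, Option.getD_some]
  have hmem := PySem.List.max?_mem hm
  have hmax := PySem.List.max?_isMax hm
  have hcenter : ((k.choose (k / 2) : Nat) : Int) ∈ pascalRow k := by
    simp only [pascalRow, List.mem_map, List.mem_range]
    exact ⟨k / 2, by omega, rfl⟩
  apply le_antisymm
  · simp only [pascalRow, List.mem_map, List.mem_range] at hmem
    obtain ⟨j, hj, rfl⟩ := hmem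
    exact_mod_cast Nat.choose_le_middle j k
  · exact hmax _ hcenter

theorem task10_alt_loop (k m : Nat) (hm : m ≤ k) :
    (PySem.List.pyRange 0 (m : Int) 1).foldl
      (fun c i => PySem.Int.floordiv (c * ((k : Int) - i)) (i + 1)) 1 = ((k.choose m : Nat) : Int) := by
  induction m with
  | zero => simp [PySem.List.pyRange_one_eq_nil]
  | succ m ih =>
    have h1 : ((m:Int) + 1) = ((m+1 : Nat) : Int) := by omega
    rw [← h1, PySem.List.pyRange_one_succ_right (by positivity), List.foldl_append,
        ih (by omega)]
    simp only [List.foldl_cons, List.foldl_nil]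
    have hkm : (k : Int) - (m:Int) = ((k - m : Nat) : Int) := by
      omega
    rw [hkm]
    have hmul : ((k.choose m : Nat) : Int) * ((k - m : Nat) : Int) = ((k.choose (m+1) : Nat) : Int) * ((m:Int) + 1) := by
      rw [← Nat.cast_mul, ← Nat.choose_succ_right_eq]
      push_cast
      ring
    rw [hmul, PySem.Int.floordiv_eq_ediv_of_pos (by positivity)]
    rw [Int.mul_ediv_cancel _ (by positivity)]

-- ===== VERDICT (by name: the statement is the Claim_ definition above) =====
theorem task10_spec : Claim_equal_task10 := by
  intro n _
  unfold Spec_task10 task10 task10_alt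
  by_cases hn : n ≤ 1
  · have hgt : ¬ (n > 1) := by omega
    simp only [hgt, if_false, PySem.List.pyRange_one_eq_nil hn]
    decide
  · have hgt : n > 1 := by omega
    set K : Nat := (n - 1).toNat with hK
    have hn1 : n - 1 = (K : Int) := by omega
    simp only [hgt, if_true]
    -- A-side: the last row after the fold is pascalRow K
    have hstart : PySem.List.pyGet? ([[1]] : List (List Int)) (-1) = some (pascalRow 0) := by
      decide
    have hlen : (PySem.List.pyRange 1 n 1).length = K := by
      rw [PySem.List.length_pyRange_one]
    have hA := task10_lastRow (PySem.List.pyRange 1 n 1) [[1]] 0 hstart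
    rw [hlen, Nat.zero_add] at hA
    rw [hA]
    simp only [Option.getD_some]
    rw [task10_max_pascalRow]
    -- B-side
    have hdiv : PySem.Int.floordiv (n - 1) 2 = ((K / 2 : Nat) : Int) := by
      rw [PySem.Int.floordiv_eq_ediv_of_pos (by norm_num)]; omega
    rw [hdiv, hn1, task10_alt_loop K (K / 2) (Nat.div_le_self _ _)]
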